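-- pv_equiv track=rewrite | github.com/zgcmiao/LNB | engine/script/postprosess_result/analyze_configure_translation_result.py | decompose_blocks
-- ===== SOURCE A (Python) =====
-- start_special_token = ["```", "< Huawei >", "'''", "####", " (please fill in the blanks)"]
--
-- end_special_token = ["```", "Note: ", "'''", "####", "\n\n\n"]
--
-- def decompose_blocks(cfg, exist_special_token=False):
--     lines = [line for line in cfg.splitlines()]
--     blocks = []
--     block = []
--
--     for line in lines:
--         if exist_special_token:
--             if line in start_special_token:
--                 continue
--             if line in end_special_token:
--                 break
--             if line.startswith(' '):
--                 block.append(line)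
--             else:
--                 if len(block) > 0:
--                     blocks.append('\n'.join(block))
--                     block = [line]
--                 else:
--                     block.append(line)
--         else:
--             if line.startswith(' '):
--                 block.append(line)
--             else:
--                 if len(block) > 0:
--                     blocks.append('\n'.join(block))
--                     block = [line]
--                 else:
--                     block.append(line)
--
--     blocks = set(blocks)
--     return blocks
-- ===== SOURCE B (Python) =====
-- start_special_token = ["```", "< Huawei >", "'''", "####", " (please fill in the blanks)"]
--
-- end_special_token = ["```", "Note: ", "'''", "####", "\n\n\n"]
--
--
-- def decompose_blocks(cfg, exist_special_token=False):
--     lines = cfg.splitlines()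
--     if exist_special_token:
--         eff = []
--         for line in lines:
--             if line in start_special_token:
--                 continue
--             if line in end_special_token:
--                 break
--             eff.append(line)
--         lines = eff
--     blocks = []
--     while lines:
--         k = 1
--         while k < len(lines) and lines[k].startswith(' '):
--             k += 1
--         if k < len(lines):          # the final group is never flushed
--             blocks.append('\n'.join(lines[:k]))
--         lines = lines[k:]
--     return set(blocks)
-- ===== Notes on version B (the rewrite author's own statement) =====
-- stated objective: simpler
-- what changed: B replaces A's interleaved single-pass accumulator (flush-on-boundary with leftover block state) by two plain phases: first filter/truncate the line list by the special tokens, then group it by leading non-space lines and emit every group except the last.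
import Mathlib
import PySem

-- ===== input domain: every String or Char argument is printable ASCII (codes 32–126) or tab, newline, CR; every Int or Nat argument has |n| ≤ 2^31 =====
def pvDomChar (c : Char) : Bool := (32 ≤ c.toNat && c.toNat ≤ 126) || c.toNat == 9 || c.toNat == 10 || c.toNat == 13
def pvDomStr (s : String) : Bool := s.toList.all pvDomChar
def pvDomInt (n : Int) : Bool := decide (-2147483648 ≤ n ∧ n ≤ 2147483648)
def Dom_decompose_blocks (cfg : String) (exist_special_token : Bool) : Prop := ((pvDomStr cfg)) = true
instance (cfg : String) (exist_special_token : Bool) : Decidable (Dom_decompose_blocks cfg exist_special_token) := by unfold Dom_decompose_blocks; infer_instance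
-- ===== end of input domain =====

-- B restructures A's interleaved flush-on-boundary accumulator into two plain phases
-- (filter/truncate by tokens, then group by non-indented lines and drop the last group); objective: simpler.

def pvStartTok : List String := ["```", "< Huawei >", "'''", "####", " (please fill in the blanks)"]
def pvEndTok : List String := ["```", "Note: ", "'''", "####", "\n\n\n"]

-- ===== PORT A =====
-- the for-loop of A: state (blocks, block); returning `blocks` early models `break`
def pvLoopA (exist : Bool) : List String → List String → List String → List String
  | [], blocks, _ => blocks
  | l :: ls, blocks, block =>
    if exist then
      if l ∈ pvStartTok then pvLoopA exist ls blocks block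
      else if l ∈ pvEndTok then blocks
      else if PySem.Str.startswith l " " then pvLoopA exist ls blocks (block ++ [l])
      else if block.length > 0 then pvLoopA exist ls (blocks ++ [PySem.Str.join "\n" block]) [l]
      else pvLoopA exist ls blocks (block ++ [l])
    else
      if PySem.Str.startswith l " " then pvLoopA exist ls blocks (block ++ [l])
      else if block.length > 0 then pvLoopA exist ls (blocks ++ [PySem.Str.join "\n" block]) [l]
      else pvLoopA exist ls blocks (block ++ [l])

def decompose_blocks (cfg : String) (exist_special_token : Bool) : List String :=
  PySem.Set.ofList (pvLoopA exist_special_token (PySem.Str.splitlines cfg) [] [])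

-- ===== PORT B =====
def pvSpacey (s : String) : Bool := PySem.Str.startswith s " "

-- phase 1 of B: drop start tokens, stop at the first end token
def pvFilter : List String → List String
  | [] => []
  | l :: ls =>
    if l ∈ pvStartTok then pvFilter ls
    else if l ∈ pvEndTok then []
    else l :: pvFilter ls

-- phase 2 of B: group head line + following indented lines; never emit the final group
def pvBlocks : List String → List String
  | [] => []
  | l :: ls =>
    if (ls.dropWhile pvSpacey).isEmpty then []
    else PySem.Str.join "\n" (l :: ls.takeWhile pvSpacey) :: pvBlocks (ls.dropWhile pvSpacey)
termination_by ls => ls.length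
decreasing_by
  simpa using Nat.lt_succ_of_le (List.length_dropWhile_le pvSpacey ls)

def decompose_blocks_alt (cfg : String) (exist_special_token : Bool) : List String :=
  let lines := PySem.Str.splitlines cfg
  PySem.Set.ofList (pvBlocks (if exist_special_token then pvFilter lines else lines))

-- ===== PRECONDITION & SPEC =====
def Spec_decompose_blocks (cfg : String) (exist_special_token : Bool) (out : List String) : Prop := out = decompose_blocks_alt cfg exist_special_token
instance (cfg : String) (exist_special_token : Bool) (out : List String) : Decidable (Spec_decompose_blocks cfg exist_special_token out) := by unfold Spec_decompose_blocks; infer_instance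

-- ===== CLAIM (what is proved, stated in full; the proofs are below) =====
def Claim_equal_decompose_blocks : Prop := ∀ (cfg : String) (exist_special_token : Bool), Dom_decompose_blocks cfg exist_special_token → Spec_decompose_blocks cfg exist_special_token (decompose_blocks cfg exist_special_token)

-- ===== LEMMAS AND PROOFS =====

-- the token test of A's loop equals running the token-free loop on B's filtered list
theorem pvLoopA_true_eq_filter (ls : List String) (blocks block : List String) :
    pvLoopA true ls blocks block = pvLoopA false (pvFilter ls) blocks block := by
  induction ls generalizing blocks block with
  | nil => rfl
  | cons l ls ih =>
    by_cases h1 : l ∈ pvStartTok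
    · simp only [pvLoopA, pvFilter, if_pos h1, if_true]
      exact ih blocks block
    · by_cases h2 : l ∈ pvEndTok
      · simp only [pvLoopA, pvFilter, if_neg h1, if_pos h2, if_true]
      · simp only [pvLoopA, pvFilter, if_neg h1, if_neg h2, if_true]
        by_cases h3 : PySem.Str.startswith l " " = true
        · simp only [if_pos h3]; exact ih blocks (block ++ [l])
        · simp only [if_neg h3]
          by_cases h4 : block.length > 0
          · simp only [if_pos h4]; exact ih (blocks ++ [PySem.Str.join "\n" block]) [l]
          · simp only [if_neg h4]; exact ih blocks (block ++ [l])

-- loop invariant: with a nonempty pending block, A's loop appends the group built from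
-- `block` plus the following indented lines, then continues as pvBlocks — unless the rest is empty
theorem pvLoopA_inv (ls : List String) (blocks block : List String) (hb : block ≠ []) :
    pvLoopA false ls blocks block =
      blocks ++ (if (ls.dropWhile pvSpacey).isEmpty then []
                 else PySem.Str.join "\n" (block ++ ls.takeWhile pvSpacey) ::
                      pvBlocks (ls.dropWhile pvSpacey)) := by
  induction ls generalizing blocks block with
  | nil => simp [pvLoopA]
  | cons l ls ih =>
    by_cases hp : PySem.Str.startswith l " " = true
    · have hp' : pvSpacey l = true := hp
      simp only [pvLoopA, Bool.false_eq_true, if_false, if_pos hp,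
        List.dropWhile_cons, List.takeWhile_cons, hp', if_true]
      rw [ih blocks (block ++ [l]) (by simp)]
      simp
    · have hp' : pvSpacey l = false := by simpa [pvSpacey] using hp
      have hlen : block.length > 0 := List.length_pos_iff.mpr hb
      simp only [pvLoopA, Bool.false_eq_true, if_false, if_neg hp, if_pos hlen,
        List.dropWhile_cons, List.takeWhile_cons, hp']
      rw [ih (blocks ++ [PySem.Str.join "\n" block]) [l] (by simp)]
      simp only [Bool.false_eq_true, if_false, List.isEmpty_cons]
      rw [pvBlocks]
      simp

-- starting from the empty pending block, A's loop computes exactly B's grouping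
theorem pvLoopA_eq_pvBlocks (ls : List String) :
    pvLoopA false ls [] [] = pvBlocks ls := by
  cases ls with
  | nil => simp [pvLoopA, pvBlocks]
  | cons l ls =>
    have step : pvLoopA false (l :: ls) [] [] = pvLoopA false ls [] [l] := by
      simp only [pvLoopA, Bool.false_eq_true, if_false, List.length_nil,
        gt_iff_lt, lt_irrefl, List.nil_append]
      split_ifs <;> rfl
    rw [step, pvLoopA_inv ls [] [l] (by simp), pvBlocks]
    simp

-- ===== VERDICT (by name: the statement is the Claim_ definition above) =====
theorem decompose_blocks_spec : Claim_equal_decompose_blocks := by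
  intro cfg exist _
  unfold Spec_decompose_blocks decompose_blocks decompose_blocks_alt
  cases exist
  · simp [pvLoopA_eq_pvBlocks]
  · simp [pvLoopA_true_eq_filter, pvLoopA_eq_pvBlocks]
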